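-- pv_equiv track=rewrite | github.com/miztiik/yen-go | tools/kisvadim_goproblems/_merge_n_into_c.py | find_node_spans
-- ===== SOURCE A (Python) =====
-- def find_node_spans(content: str) -> list[tuple[int, int]]:
--     """Find (start, end) index spans for each node in SGF content.
--
--     A node starts at ';' (outside property values) and extends until the next
--     ';', '(', or ')' that is also outside property values.
--     """
--     spans: list[tuple[int, int]] = []
--     in_bracket = False
--     node_start: int | None = None
--
--     i = 0
--     while i < len(content):
--         ch = content[i]
--
--         if in_bracket:
--             if ch == '\\' and i + 1 < len(content):
--                 i += 2  # skip escaped character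
--                 continue
--             if ch == ']':
--                 in_bracket = False
--         else:
--             if ch == '[':
--                 in_bracket = True
--             elif ch == ';':
--                 if node_start is not None:
--                     spans.append((node_start, i))
--                 node_start = i
--             elif ch in '()':
--                 if node_start is not None:
--                     spans.append((node_start, i))
--                     node_start = None
--
--         i += 1
--
--     # Handle last node if file doesn't end with ) or ;
--     if node_start is not None:
--         spans.append((node_start, len(content)))
--
--     return spans
-- ===== SOURCE B (Python) =====
-- def find_node_spans(content: str) -> list[tuple[int, int]]:
--     """Two-pass variant: collect structural delimiters, then pair each ';'
--     with the index of the next delimiter (or end of content)."""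
--     n = len(content)
--     # pass 1: delimiters outside property values, as (index, is_semicolon)
--     delims: list[tuple[int, bool]] = []
--     in_bracket = False
--     i = 0
--     while i < n:
--         ch = content[i]
--         if in_bracket:
--             if ch == '\\' and i + 1 < n:
--                 i += 2
--                 continue
--             if ch == ']':
--                 in_bracket = False
--         else:
--             if ch == '[':
--                 in_bracket = True
--             elif ch == ';':
--                 delims.append((i, True))
--             elif ch in '()':
--                 delims.append((i, False))
--         i += 1
--     # pass 2: each semicolon delimiter spans to the next delimiter (or n)
--     ends = [j for j, _ in delims[1:]] + [n]
--     return [(i, e) for (i, is_semi), e in zip(delims, ends) if is_semi]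
-- ===== Notes on version B (the rewrite author's own statement) =====
-- stated objective: alternative
-- what changed: A's single fused scan that pairs spans with node_start state is split into two passes: a delimiter-collecting scan followed by a stateless zip of each semicolon delimiter with the next delimiter's index (or len(content)).
import Mathlib
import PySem

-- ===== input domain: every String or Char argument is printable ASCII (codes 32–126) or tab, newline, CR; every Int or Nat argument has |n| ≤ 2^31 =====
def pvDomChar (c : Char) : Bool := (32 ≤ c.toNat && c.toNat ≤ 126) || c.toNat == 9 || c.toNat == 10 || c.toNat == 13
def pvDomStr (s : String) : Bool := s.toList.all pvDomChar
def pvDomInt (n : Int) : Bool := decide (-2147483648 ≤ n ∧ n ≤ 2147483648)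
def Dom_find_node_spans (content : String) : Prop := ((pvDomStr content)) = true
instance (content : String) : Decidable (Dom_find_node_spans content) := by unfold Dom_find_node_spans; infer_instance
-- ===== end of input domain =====

-- B replaces A's fused scan-and-pair single pass by a two-pass decomposition:
-- first collect structural delimiters, then pair each ';' with the next
-- delimiter index via zip (objective: alternative decomposition, same cost).

-- ===== PORT A =====
-- spans appended for an open node_start at index i
def pvOptSpan (ns : Option Nat) (i : Nat) : List (Int × Int) :=
  match ns with
  | some s => [((s : Int), (i : Int))]
  | none => []

-- A's while loop: index i over the char list, in_bracket + node_start state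
def pvLoopA : List Char → Nat → Bool → Option Nat → List (Int × Int) → List (Int × Int)
  | [], i, _, ns, spans => spans ++ pvOptSpan ns i
  | c :: rest, i, ib, ns, spans =>
    if ib then
      if c = '\\' then
        match rest with
        | _ :: rest' => pvLoopA rest' (i + 2) true ns spans   -- skip escaped character
        | [] => pvLoopA [] (i + 1) true ns spans              -- '\' is last char: falls through
      else if c = ']' then pvLoopA rest (i + 1) false ns spans
      else pvLoopA rest (i + 1) true ns spans
    else
      if c = '[' then pvLoopA rest (i + 1) true ns spans
      else if c = ';' then pvLoopA rest (i + 1) false (some i) (spans ++ pvOptSpan ns i)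
      else if c = '(' ∨ c = ')' then pvLoopA rest (i + 1) false none (spans ++ pvOptSpan ns i)
      else pvLoopA rest (i + 1) false ns spans

def find_node_spans (content : String) : List (Int × Int) :=
  pvLoopA content.toList 0 false none []

-- ===== PORT B =====
-- B's pass 1: the structural delimiters as (index, is_semicolon)
def pvScanB : List Char → Nat → Bool → List (Nat × Bool)
  | [], _, _ => []
  | c :: rest, i, ib =>
    if ib then
      if c = '\\' then
        match rest with
        | _ :: rest' => pvScanB rest' (i + 2) true
        | [] => pvScanB [] (i + 1) true
      else if c = ']' then pvScanB rest (i + 1) false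
      else pvScanB rest (i + 1) true
    else
      if c = '[' then pvScanB rest (i + 1) true
      else if c = ';' then (i, true) :: pvScanB rest (i + 1) false
      else if c = '(' ∨ c = ')' then (i, false) :: pvScanB rest (i + 1) false
      else pvScanB rest (i + 1) false

-- B's pass 2: zip each delimiter with the next delimiter's index (or n), keep ';'
def find_node_spans_alt (content : String) : List (Int × Int) :=
  let n := content.toList.length
  let delims := pvScanB content.toList 0 false
  let ends := (delims.drop 1).map Prod.fst ++ [n]
  (delims.zip ends).filterMap
    (fun p => if p.1.2 then some ((p.1.1 : Int), (p.2 : Int)) else none)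

-- ===== PRECONDITION & SPEC =====
def Spec_find_node_spans (content : String) (out : List (Int × Int)) : Prop := out = find_node_spans_alt content
instance (content : String) (out : List (Int × Int)) : Decidable (Spec_find_node_spans content out) := by unfold Spec_find_node_spans; infer_instance

-- ===== CLAIM (what is proved, stated in full; the proofs are below) =====
def Claim_equal_find_node_spans : Prop := ∀ (content : String), Dom_find_node_spans content → Spec_find_node_spans content (find_node_spans content)

-- ===== LEMMAS AND PROOFS =====

-- A-side pairing of a delimiter list, as A's second half of the loop does it
def pvPairUp : List (Nat × Bool) → Option Nat → Nat → List (Int × Int)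
  | [], ns, n => pvOptSpan ns n
  | (j, b) :: rest, ns, _n => pvOptSpan ns j ++ pvPairUp rest (if b then some j else none) _n

-- B's zip-based pass 2 as a function of the delimiter list
def pvZipRes (d : List (Nat × Bool)) (n : Nat) : List (Int × Int) :=
  (d.zip ((d.drop 1).map Prod.fst ++ [n])).filterMap
    (fun p => if p.1.2 then some ((p.1.1 : Int), (p.2 : Int)) else none)

def pvHeadIdx (d : List (Nat × Bool)) (n : Nat) : Nat :=
  match d with
  | [] => n
  | (j, _) :: _ => j

theorem pvPairUp_eq_zipRes (d : List (Nat × Bool)) (n : Nat) (ns : Option Nat) :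
    pvPairUp d ns n = pvOptSpan ns (pvHeadIdx d n) ++ pvZipRes d n := by
  induction d generalizing ns with
  | nil => cases ns <;> simp [pvPairUp, pvZipRes, pvHeadIdx, pvOptSpan]
  | cons hd tl ih =>
    obtain ⟨j, b⟩ := hd
    have hz : pvZipRes ((j, b) :: tl) n
        = (if b then [((j : Int), (pvHeadIdx tl n : Int))] else []) ++ pvZipRes tl n := by
      cases tl with
      | nil => cases b <;> simp [pvZipRes, pvHeadIdx]
      | cons x xs =>
        obtain ⟨k, c⟩ := x
        cases b <;> simp [pvZipRes, pvHeadIdx]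
    cases b with
    | true =>
      rw [show pvPairUp ((j, true) :: tl) ns n
            = pvOptSpan ns j ++ pvPairUp tl (some j) n from rfl, ih (some j), hz]
      simp [pvOptSpan, pvHeadIdx]
    | false =>
      rw [show pvPairUp ((j, false) :: tl) ns n
            = pvOptSpan ns j ++ pvPairUp tl none n from rfl, ih none, hz]
      simp [pvOptSpan, pvHeadIdx]

theorem pvLoopA_eq (cs : List Char) (i : Nat) (ib : Bool) (ns : Option Nat)
    (spans : List (Int × Int)) :
    pvLoopA cs i ib ns spans = spans ++ pvPairUp (pvScanB cs i ib) ns (i + cs.length) := by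
  fun_induction pvLoopA cs i ib ns spans
  all_goals (try (conv_rhs => rw [pvScanB.eq_def]))
  all_goals simp_all [pvPairUp, pvScanB, List.append_assoc,
    Nat.add_assoc, Nat.add_comm, Nat.add_left_comm]

-- ===== VERDICT (by name: the statement is the Claim_ definition above) =====
theorem find_node_spans_spec : Claim_equal_find_node_spans := by
  intro content _
  show find_node_spans content = find_node_spans_alt content
  unfold find_node_spans find_node_spans_alt
  rw [pvLoopA_eq]
  have := pvPairUp_eq_zipRes (pvScanB content.toList 0 false) content.toList.length none
  simpa [pvOptSpan, pvZipRes] using this
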